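-- pv_equiv track=rewrite | github.com/zakery292/batteryautomation | battery_predictions.py | is_charging_period
-- ===== SOURCE A (Python) =====
-- def is_charging_period(historical_data):
--     """Determine if the given period is a charging period based on consecutive SoC increases."""
--     increases = 0
--     for i in range(1, len(historical_data)):
--         if historical_data[i][1] > historical_data[i - 1][1]:
--             increases += 1
--         else:
--             increases = 0
--
--         # Consider it a charging period if there are several consecutive increases
--         if increases >= 2:
--             return True
--     return False
-- ===== SOURCE B (Python) =====
-- def is_charging_period(historical_data):
--     """Determine if the given period is a charging period based on consecutive SoC increases."""
--     return any(a[1] < b[1] < c[1]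
--                for a, b, c in zip(historical_data, historical_data[1:], historical_data[2:]))
-- ===== Notes on version B (the rewrite author's own statement) =====
-- stated objective: simpler
-- what changed: Replaces the stateful reset-on-failure increase counter with a stateless any() over a sliding length-3 window (zip of the list with its two shifts) testing a double strict increase directly.
import Mathlib
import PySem

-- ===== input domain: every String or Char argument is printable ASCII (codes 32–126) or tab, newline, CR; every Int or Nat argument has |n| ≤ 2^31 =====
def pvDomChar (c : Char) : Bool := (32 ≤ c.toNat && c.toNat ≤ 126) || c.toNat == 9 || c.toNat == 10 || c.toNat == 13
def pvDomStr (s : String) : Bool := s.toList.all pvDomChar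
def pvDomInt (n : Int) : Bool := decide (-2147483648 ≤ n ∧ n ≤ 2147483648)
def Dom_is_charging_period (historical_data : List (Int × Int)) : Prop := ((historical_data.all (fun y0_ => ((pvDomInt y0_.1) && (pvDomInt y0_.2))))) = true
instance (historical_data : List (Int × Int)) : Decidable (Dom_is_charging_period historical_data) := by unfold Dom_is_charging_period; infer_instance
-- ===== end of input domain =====

-- B replaces A's reset-on-failure increase counter with a stateless any() over a sliding
-- length-3 window (simpler decomposition, same O(n) cost).


-- ===== PORT A =====
-- loop over i = 1..len-1, carrying the previous element's SoC and the `increases` counter;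
-- returning `true` inside the loop is modelled by the recursion stopping with `true`.
def isChargingLoopA (prev : Int) (increases : Int) : List (Int × Int) → Bool
  | [] => false
  | x :: rest =>
    let increases' := if x.2 > prev then increases + 1 else 0
    if increases' ≥ 2 then true else isChargingLoopA x.2 increases' rest

def is_charging_period (historical_data : List (Int × Int)) : Bool :=
  match historical_data with
  | [] => false
  | x :: rest => isChargingLoopA x.2 0 rest

-- ===== PORT B =====
-- any(a[1] < b[1] < c[1] for a, b, c in zip(d, d[1:], d[2:]))
def is_charging_period_alt (historical_data : List (Int × Int)) : Bool :=
  (historical_data.zip (historical_data.tail.zip historical_data.tail.tail)).any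
    (fun p => p.1.2 < p.2.1.2 && p.2.1.2 < p.2.2.2)

-- ===== PRECONDITION & SPEC =====
def Spec_is_charging_period (historical_data : List (Int × Int)) (out : Bool) : Prop := out = is_charging_period_alt historical_data
instance (historical_data : List (Int × Int)) (out : Bool) : Decidable (Spec_is_charging_period historical_data out) := by unfold Spec_is_charging_period; infer_instance

-- ===== CLAIM (what is proved, stated in full; the proofs are below) =====
def Claim_equal_is_charging_period : Prop := ∀ (historical_data : List (Int × Int)), Dom_is_charging_period historical_data → Spec_is_charging_period historical_data (is_charging_period historical_data)

-- ===== LEMMAS AND PROOFS =====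

-- "some three consecutive SoC values strictly increase", over the bare SoC list
def win : List Int → Bool
  | x :: y :: z :: l => (x < y && y < z) || win (y :: z :: l)
  | _ => false

theorem win_drop_head (p s : Int) (l : List Int) (h : ¬ s > p) :
    win (p :: s :: l) = win (s :: l) := by
  cases l with
  | nil => simp [win]
  | cons z l' =>
    have : decide (p < s) = false := by simp; omega
    simp [win, this]

theorem loopA_char (rest : List (Int × Int)) :
    (∀ prev, isChargingLoopA prev 0 rest = win (prev :: rest.map Prod.snd)) ∧
    (∀ prev q, q < prev → isChargingLoopA prev 1 rest = win (q :: prev :: rest.map Prod.snd)) := by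
  induction rest with
  | nil =>
    constructor
    · intro prev; simp [isChargingLoopA, win]
    · intro prev q _; simp [isChargingLoopA, win]
  | cons x l ih =>
    constructor
    · intro prev
      by_cases h : x.2 > prev
      · have : isChargingLoopA prev 0 (x :: l) = isChargingLoopA x.2 1 l := by
          simp [isChargingLoopA, h]
        rw [this, ih.2 x.2 prev h]
        simp
      · have : isChargingLoopA prev 0 (x :: l) = isChargingLoopA x.2 0 l := by
          simp [isChargingLoopA, h]
        rw [this, ih.1 x.2, List.map_cons, win_drop_head prev x.2 _ h]
    · intro prev q hq
      by_cases h : x.2 > prev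
      · have : isChargingLoopA prev 1 (x :: l) = true := by
          simp [isChargingLoopA, h]
        rw [this]
        have h1 : decide (q < prev) = true := by simpa using hq
        have h2 : decide (prev < x.2) = true := by simpa using h
        simp [win, h1, h2]
      · have : isChargingLoopA prev 1 (x :: l) = isChargingLoopA x.2 0 l := by
          simp [isChargingLoopA, h]
        rw [this, ih.1 x.2]
        have h1 : decide (prev < x.2) = false := by simp; omega
        simp [win, h1, win_drop_head prev x.2 _ h]

theorem alt_eq_win (d : List (Int × Int)) :
    is_charging_period_alt d = win (d.map Prod.snd) := by
  induction d with
  | nil => simp [is_charging_period_alt, win]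
  | cons a t ih =>
    cases t with
    | nil => simp [is_charging_period_alt, win]
    | cons b t' =>
      cases t' with
      | nil => simp [is_charging_period_alt, win]
      | cons c l =>
        simp only [is_charging_period_alt, List.tail_cons, List.zip_cons_cons,
          List.any_cons, List.map_cons] at *
        rw [ih]
        simp [win]

-- ===== VERDICT (by name: the statement is the Claim_ definition above) =====
theorem is_charging_period_spec : Claim_equal_is_charging_period := by
  intro d _
  unfold Spec_is_charging_period
  rw [alt_eq_win]
  cases d with
  | nil => simp [is_charging_period, win]
  | cons x rest =>
    simp only [is_charging_period, List.map_cons]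
    exact (loopA_char rest).1 x.2
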